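-- pv_equiv track=rewrite | github.com/andrew-bortvin/text_gen | ee.py | fill_next_kmer_dict
-- ===== SOURCE A (Python) =====
-- def fill_next_kmer_dict(in_string, k, in_dict):
-- 	for i in range(len(in_string) - k - k + 1):
-- 		current_kmer = in_string[i:i+k]
-- 		next_kmer = in_string[i + k:i + k + k]
-- 		in_dict.setdefault(current_kmer, dict())
-- 		in_dict[current_kmer].setdefault(next_kmer, 0)
-- 		in_dict[current_kmer][next_kmer] += 1
--
-- 	return(in_dict)
-- ===== SOURCE B (Python) =====
-- def fill_next_kmer_dict(in_string, k, in_dict):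
-- 	# Pass 0: materialize the list of (current, next) kmer transition pairs.
-- 	pairs = [(in_string[i:i + k], in_string[i + k:i + 2 * k])
-- 	         for i in range(len(in_string) - 2 * k + 1)]
-- 	# Pass 1: aggregate the pairs into a flat counter.
-- 	counts = {}
-- 	for p in pairs:
-- 		counts[p] = counts.get(p, 0) + 1
-- 	# Pass 2: fold each aggregated count into the nested dict, preserving existing counts.
-- 	for (cur, nxt), c in counts.items():
-- 		bucket = in_dict.get(cur, {})
-- 		bucket[nxt] = bucket.get(nxt, 0) + c
-- 		in_dict[cur] = bucket
-- 	return in_dict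
-- ===== Notes on version B (the rewrite author's own statement) =====
-- stated objective: alternative
-- what changed: Instead of A's single pass that updates the nested dict with setdefaults and an in-place increment at every position, B first materializes the transition-pair list, aggregates it into a flat counter keyed by (current, next), and only then folds each aggregated count into the nested dict.
import Mathlib
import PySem

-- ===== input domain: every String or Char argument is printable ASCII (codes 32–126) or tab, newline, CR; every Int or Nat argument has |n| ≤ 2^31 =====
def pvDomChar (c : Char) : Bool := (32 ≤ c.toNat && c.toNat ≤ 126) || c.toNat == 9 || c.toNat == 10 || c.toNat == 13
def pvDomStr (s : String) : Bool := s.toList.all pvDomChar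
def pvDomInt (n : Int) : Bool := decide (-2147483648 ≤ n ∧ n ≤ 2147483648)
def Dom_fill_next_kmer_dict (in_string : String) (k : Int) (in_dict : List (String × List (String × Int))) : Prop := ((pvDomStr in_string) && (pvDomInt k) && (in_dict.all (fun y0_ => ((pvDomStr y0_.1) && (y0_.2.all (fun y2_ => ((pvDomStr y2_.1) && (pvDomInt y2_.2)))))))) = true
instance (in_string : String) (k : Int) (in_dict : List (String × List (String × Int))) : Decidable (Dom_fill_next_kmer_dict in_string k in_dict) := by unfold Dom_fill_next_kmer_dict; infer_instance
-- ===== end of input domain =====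

-- B replaces A's single pass of per-position nested-dict updates by a three-stage pipeline:
-- materialize the transition-pair list, aggregate it into a flat counter, then fold each
-- aggregated count into the nested dict (objective: alternative decomposition).
-- Python's in_dict is mutated in place and returned; B performs the same mutation, so the
-- equivalence of return values is the whole story.

-- boundary conversion shared by both ports: the Python dict argument as an assoc list
def pvToND (l : List (String × List (String × Int))) : PySem.Dict String (PySem.Dict String Int) :=
  PySem.Dict.ofList (l.map (fun p => (p.1, PySem.Dict.ofList p.2)))

def pvFromND (d : PySem.Dict String (PySem.Dict String Int)) : List (String × List (String × Int)) :=
  d.items.map (fun p => (p.1, p.2.items))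

-- ===== PORT A =====
def fill_next_kmer_dict (in_string : String) (k : Int) (in_dict : List (String × List (String × Int))) : List (String × List (String × Int)) :=
  let res := (PySem.List.pyRange 0 (PySem.Str.len in_string - k - k + 1) 1).foldl
    (fun d i =>
      let current_kmer := PySem.Str.slice in_string (some i) (some (i + k))
      let next_kmer := PySem.Str.slice in_string (some (i + k)) (some (i + k + k))
      let d := d.setdefault current_kmer PySem.Dict.empty
      let inner := (d.getD current_kmer PySem.Dict.empty).setdefault next_kmer 0
      let d := d.insert current_kmer inner
      let inner2 := d.getD current_kmer PySem.Dict.empty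
      d.insert current_kmer (inner2.insert next_kmer (inner2.getD next_kmer 0 + 1)))
    (pvToND in_dict)
  pvFromND res

-- ===== PORT B =====
def fill_next_kmer_dict_alt (in_string : String) (k : Int) (in_dict : List (String × List (String × Int))) : List (String × List (String × Int)) :=
  -- Pass 0: the list of (current, next) transition pairs
  let pairs := (PySem.List.pyRange 0 (PySem.Str.len in_string - 2 * k + 1) 1).map
    (fun i => (PySem.Str.slice in_string (some i) (some (i + k)),
               PySem.Str.slice in_string (some (i + k)) (some (i + 2 * k))))
  -- Pass 1: counts[p] = counts.get(p, 0) + 1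
  let counts := pairs.foldl
    (fun c p => c.insert p (c.getD p 0 + 1))
    (PySem.Dict.empty : PySem.Dict (String × String) Int)
  -- Pass 2: bucket = in_dict.get(cur, {}); bucket[nxt] = bucket.get(nxt, 0) + c; in_dict[cur] = bucket
  let res := counts.items.foldl
    (fun d pc => d.modify pc.1.1 PySem.Dict.empty (fun b => b.modify pc.1.2 0 (· + pc.2)))
    (pvToND in_dict)
  pvFromND res

-- ===== PRECONDITION & SPEC =====
def Spec_fill_next_kmer_dict (in_string : String) (k : Int) (in_dict : List (String × List (String × Int))) (out : List (String × List (String × Int))) : Prop := out = fill_next_kmer_dict_alt in_string k in_dict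
instance (in_string : String) (k : Int) (in_dict : List (String × List (String × Int))) (out : List (String × List (String × Int))) : Decidable (Spec_fill_next_kmer_dict in_string k in_dict out) := by unfold Spec_fill_next_kmer_dict; infer_instance

-- ===== CLAIM (what is proved, stated in full; the proofs are below) =====
def Claim_equal_fill_next_kmer_dict : Prop := ∀ (in_string : String) (k : Int) (in_dict : List (String × List (String × Int))), Dom_fill_next_kmer_dict in_string k in_dict → Spec_fill_next_kmer_dict in_string k in_dict (fill_next_kmer_dict in_string k in_dict)

-- ===== LEMMAS AND PROOFS =====

def pvAddAt (d : PySem.Dict String (PySem.Dict String Int)) (cur nxt : String) (c : Int) : PySem.Dict String (PySem.Dict String Int) :=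
  let d' := d.setdefault cur PySem.Dict.empty
  let b := d'.getD cur PySem.Dict.empty
  d'.insert cur (b.insert nxt (b.getD nxt 0 + c))

def pvHasPair (d : PySem.Dict String (PySem.Dict String Int)) (cur nxt : String) : Prop :=
  d.contains cur = true ∧ (d.getD cur PySem.Dict.empty).contains nxt = true

-- generic insert-comm when one key already present
theorem pv_insert_comm {κ ν : Type} [BEq κ] [LawfulBEq κ] (d : PySem.Dict κ ν) (a b : κ) (v w : ν)
    (hab : a ≠ b) (ha : d.contains a = true) :
    (d.insert b w).insert a v = (d.insert a v).insert b w := by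
  apply PySem.Dict.ext
  have hba : (b == a) = false := by simp; exact fun h => hab h.symm
  have hab' : (a == b) = false := by simp [hab]
  by_cases hb : d.contains b = true
  · rw [PySem.Dict.items_insert_of_contains _ v (by simp [PySem.Dict.contains_insert, ha]),
        PySem.Dict.items_insert_of_contains _ w hb,
        PySem.Dict.items_insert_of_contains _ w (by simp [PySem.Dict.contains_insert, hb]),
        PySem.Dict.items_insert_of_contains _ v ha]
    simp only [List.map_map]
    apply List.map_congr_left
    intro p _
    by_cases hpa : (p.1 == a) = true
    · have : (p.1 == b) = false := by
        simp_all [beq_iff_eq]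
      simp [Function.comp, this, hpa, hab]
    · by_cases hpb : (p.1 == b) = true
      · simp [Function.comp, hpa, hpb, hba]
      · simp [Function.comp, hpa, hpb]
  · have hb' : d.contains b = false := by simpa using hb
    rw [PySem.Dict.items_insert_of_not_contains _ w (by simp [PySem.Dict.contains_insert, hb', hba]),
        PySem.Dict.items_insert_of_contains _ v (by simp [PySem.Dict.contains_insert, ha]),
        PySem.Dict.items_insert_of_not_contains _ w hb',
        PySem.Dict.items_insert_of_contains _ v ha]
    rw [List.map_append]
    simp [hba]

theorem pv_addAt_of_contains (d : PySem.Dict String (PySem.Dict String Int)) (cur nxt : String) (c : Int)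
    (h : d.contains cur = true) :
    pvAddAt d cur nxt c = d.insert cur (((d.getD cur PySem.Dict.empty).insert nxt ((d.getD cur PySem.Dict.empty).getD nxt 0 + c))) := by
  simp [pvAddAt, PySem.Dict.setdefault_of_contains _ _ h]

theorem pv_hasPair_addAt_self (d : PySem.Dict String (PySem.Dict String Int)) (cur nxt : String) (c : Int) :
    pvHasPair (pvAddAt d cur nxt c) cur nxt := by
  constructor
  · simp [pvAddAt, PySem.Dict.contains_insert_self]
  · simp [pvAddAt, PySem.Dict.getD_insert_self]

theorem pv_hasPair_addAt (d : PySem.Dict String (PySem.Dict String Int)) (cur nxt q1 q2 : String) (c : Int)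
    (h : pvHasPair d cur nxt) : pvHasPair (pvAddAt d q1 q2 c) cur nxt := by
  obtain ⟨h1, h2⟩ := h
  by_cases hq : cur = q1
  · subst hq
    constructor
    · simp [pvAddAt, PySem.Dict.contains_insert_self]
    · simp [pvAddAt, PySem.Dict.getD_insert_self, PySem.Dict.contains_insert,
            PySem.Dict.setdefault_of_contains _ _ h1, h2]
  · constructor
    · simp [pvAddAt, PySem.Dict.contains_insert, PySem.Dict.contains_setdefault, h1]
    · rw [pvAddAt]
      rw [PySem.Dict.getD_insert_of_ne _ _ _ hq]
      have : (d.setdefault q1 PySem.Dict.empty).getD cur PySem.Dict.empty = d.getD cur PySem.Dict.empty := by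
        rw [PySem.Dict.getD_eq_get?_getD, PySem.Dict.get?_setdefault_of_ne _ _ hq, ← PySem.Dict.getD_eq_get?_getD]
      rw [this]; exact h2

theorem pv_addAt_succ (d : PySem.Dict String (PySem.Dict String Int)) (cur nxt : String) (c : Int) :
    pvAddAt d cur nxt (c + 1) = pvAddAt (pvAddAt d cur nxt c) cur nxt 1 := by
  rw [pv_addAt_of_contains _ _ _ _ (pv_hasPair_addAt_self d cur nxt c).1]
  simp [pvAddAt, PySem.Dict.getD_insert_self, PySem.Dict.insert_insert_self, add_assoc]

theorem pv_addAt_comm (d : PySem.Dict String (PySem.Dict String Int)) (x1 x2 q1 q2 : String) (c : Int)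
    (hne : (q1, q2) ≠ (x1, x2)) (hx : pvHasPair d x1 x2) :
    pvAddAt (pvAddAt d q1 q2 c) x1 x2 1 = pvAddAt (pvAddAt d x1 x2 1) q1 q2 c := by
  obtain ⟨h1, h2⟩ := hx
  by_cases hq : q1 = x1
  · subst hq
    have hq2 : x2 ≠ q2 := by intro h; exact hne (by rw [h])
    rw [pv_addAt_of_contains _ _ _ _ h1, pv_addAt_of_contains _ _ _ _ h1,
        pv_addAt_of_contains _ _ _ _ (by simp [PySem.Dict.contains_insert_self]),
        pv_addAt_of_contains _ _ _ _ (by simp [PySem.Dict.contains_insert_self])]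
    simp only [PySem.Dict.getD_insert_self, PySem.Dict.insert_insert_self]
    rw [PySem.Dict.getD_insert_of_ne _ _ _ hq2, PySem.Dict.getD_insert_of_ne _ _ _ (Ne.symm hq2)]
    rw [pv_insert_comm _ x2 q2 _ _ hq2 h2]
  · -- q1 ≠ x1 : outer keys distinct
    have hq' : x1 ≠ q1 := Ne.symm hq
    -- bucket at x1 unchanged by the q-update, and vice versa for q1's bucket
    have egx : ∀ (e : PySem.Dict String Int), (pvAddAt d q1 q2 c).getD x1 e = d.getD x1 e := by
      intro e
      rw [pvAddAt]
      rw [PySem.Dict.getD_insert_of_ne _ _ _ hq']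
      rw [PySem.Dict.getD_eq_get?_getD, PySem.Dict.get?_setdefault_of_ne _ _ hq', ← PySem.Dict.getD_eq_get?_getD]
    have hcq : (pvAddAt d q1 q2 c).contains x1 = true := by
      simp [pvAddAt, PySem.Dict.contains_insert, PySem.Dict.contains_setdefault, h1]
    rw [pv_addAt_of_contains _ _ _ _ hcq]
    rw [pv_addAt_of_contains _ _ _ _ h1]
    rw [egx]
    by_cases hdq : d.contains q1 = true
    · rw [pv_addAt_of_contains _ _ _ _ hdq,
          pv_addAt_of_contains _ _ _ _ (by simp [PySem.Dict.contains_insert, hdq])]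
      rw [PySem.Dict.getD_insert_of_ne _ _ _ hq]
      exact pv_insert_comm _ x1 q1 _ _ hq' h1
    · have hdq' : d.contains q1 = false := by simpa using hdq
      have hdq2 : (d.insert x1 ((d.getD x1 PySem.Dict.empty).insert x2 ((d.getD x1 PySem.Dict.empty).getD x2 0 + 1))).contains q1 = false := by
        simp [PySem.Dict.contains_insert, hdq', hq]
      rw [pvAddAt, pvAddAt]
      rw [PySem.Dict.setdefault_of_not_contains _ _ hdq',
          PySem.Dict.setdefault_of_not_contains _ _ hdq2]
      simp only [PySem.Dict.getD_insert_self]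
      rw [PySem.Dict.insert_insert_self, PySem.Dict.insert_insert_self]
      exact pv_insert_comm _ x1 q1 _ _ hq' h1

def pvApply (nd : PySem.Dict String (PySem.Dict String Int)) (l : List ((String × String) × Int)) : PySem.Dict String (PySem.Dict String Int) :=
  l.foldl (fun d pc => pvAddAt d pc.1.1 pc.1.2 pc.2) nd

theorem pv_pull (post : List ((String × String) × Int)) (nd : PySem.Dict String (PySem.Dict String Int))
    (x : String × String) (hpost : ∀ p ∈ post, p.1 ≠ x) (h : pvHasPair nd x.1 x.2) :
    pvApply (pvAddAt nd x.1 x.2 1) post = pvAddAt (pvApply nd post) x.1 x.2 1 := by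
  induction post generalizing nd with
  | nil => rfl
  | cons q post ih =>
    have hq : q.1 ≠ x := hpost q (List.mem_cons_self)
    have hq' : (q.1.1, q.1.2) ≠ (x.1, x.2) := by simpa using hq
    show pvApply (pvAddAt (pvAddAt nd x.1 x.2 1) q.1.1 q.1.2 q.2) post = _
    rw [← pv_addAt_comm nd x.1 x.2 q.1.1 q.1.2 q.2 hq' h]
    rw [ih _ (fun p hp => hpost p (List.mem_cons_of_mem _ hp)) (pv_hasPair_addAt nd x.1 x.2 q.1.1 q.1.2 q.2 h)]
    rfl

theorem pv_key_step (c : PySem.Dict (String × String) Int) (x : String × String)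
    (nd : PySem.Dict String (PySem.Dict String Int)) (hc : c.keys.Nodup) :
    pvApply nd ((c.insert x (c.getD x 0 + 1)).items) = pvAddAt (pvApply nd c.items) x.1 x.2 1 := by
  by_cases hx : c.contains x = true
  · -- x already counted: its entry is overwritten in place
    obtain ⟨v, hv⟩ : ∃ v, c.get? x = some v := by
      have := PySem.Dict.contains_eq_isSome_get? (d := c) (k := x)
      rw [hx] at this
      exact Option.isSome_iff_exists.mp this.symm
    have hmem : (x, v) ∈ c.items := PySem.Dict.mem_items_of_get?_eq_some c hv
    obtain ⟨l1, l2, hitems⟩ := List.append_of_mem hmem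
    have hgd : c.getD x 0 = v := PySem.Dict.getD_of_mem_items c hmem hc 0
    have hkeys : (l1.map Prod.fst ++ x :: l2.map Prod.fst).Nodup := by
      have : c.keys = l1.map Prod.fst ++ x :: l2.map Prod.fst := by
        simp only [PySem.Dict.keys, hitems]; simp
      rw [← this]; exact hc
    have hx1 : ∀ p ∈ l1, p.1 ≠ x := by
      intro p hp hcontra
      have hmm : x ∈ l1.map Prod.fst := List.mem_map.mpr ⟨p, hp, hcontra⟩
      exact (List.nodup_append.mp hkeys).2.2 x hmm x (List.mem_cons_self) rfl
    have hx2 : ∀ p ∈ l2, p.1 ≠ x := by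
      intro p hp hcontra
      have hmm : x ∈ l2.map Prod.fst := List.mem_map.mpr ⟨p, hp, hcontra⟩
      have := (List.nodup_append.mp hkeys).2.1
      exact (List.nodup_cons.mp this).1 hmm
    have hmap1 : ∀ p ∈ l1, (if (p.1 == x) = true then (x, c.getD x 0 + 1) else p) = p := by
      intro p hp; simp [hx1 p hp]
    have hmap2 : ∀ p ∈ l2, (if (p.1 == x) = true then (x, c.getD x 0 + 1) else p) = p := by
      intro p hp; simp [hx2 p hp]
    rw [PySem.Dict.items_insert_of_contains _ _ hx, hitems]
    rw [List.map_append, List.map_cons]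
    rw [List.map_congr_left hmap1, List.map_congr_left hmap2]
    simp only [beq_self_eq_true, reduceIte, List.map_id_fun', id]
    show pvApply nd (l1 ++ (x, c.getD x 0 + 1) :: l2) = _
    rw [hgd]
    unfold pvApply
    rw [List.foldl_append, List.foldl_append, List.foldl_cons, List.foldl_cons]
    show pvApply (pvAddAt (List.foldl _ nd l1) x.1 x.2 (v + 1)) l2
       = pvAddAt (pvApply (pvAddAt (List.foldl _ nd l1) x.1 x.2 v) l2) x.1 x.2 1
    rw [pv_addAt_succ]
    exact pv_pull l2 _ x hx2 (pv_hasPair_addAt_self _ x.1 x.2 v)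
  · have hx' : c.contains x = false := by simpa using hx
    rw [PySem.Dict.items_insert_of_not_contains _ _ hx']
    rw [PySem.Dict.getD_of_not_contains _ _ hx']
    unfold pvApply
    rw [List.foldl_append, List.foldl_cons]
    norm_num

theorem pv_main (l : List (String × String)) (c : PySem.Dict (String × String) Int)
    (nd : PySem.Dict String (PySem.Dict String Int)) (hc : c.keys.Nodup) :
    pvApply nd ((l.foldl (fun d p => d.insert p (d.getD p 0 + 1)) c).items)
      = l.foldl (fun d p => pvAddAt d p.1 p.2 1) (pvApply nd c.items) := by
  induction l generalizing c with
  | nil => rfl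
  | cons x l ih =>
    rw [List.foldl_cons, List.foldl_cons]
    rw [ih _ (PySem.Dict.nodup_keys_insert _ _ _ hc)]
    rw [pv_key_step c x nd hc]

-- modify IS insert of the modified lookup (both overwrite in place / append at the end)
theorem pv_modify_eq_insert {κ ν : Type} [BEq κ] [LawfulBEq κ] (d : PySem.Dict κ ν) (k : κ) (d0 : ν) (f : ν → ν) :
    d.modify k d0 f = d.insert k (f (d.getD k d0)) := rfl

-- A's per-step body is one pvAddAt with increment 1
theorem pv_stepA (d : PySem.Dict String (PySem.Dict String Int)) (cur nxt : String) :
    (let d1 := d.setdefault cur PySem.Dict.empty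
     let inner := (d1.getD cur PySem.Dict.empty).setdefault nxt 0
     let d2 := d1.insert cur inner
     let inner2 := d2.getD cur PySem.Dict.empty
     d2.insert cur (inner2.insert nxt (inner2.getD nxt 0 + 1))) = pvAddAt d cur nxt 1 := by
  simp only [PySem.Dict.getD_insert_self, PySem.Dict.insert_insert_self, pvAddAt]
  by_cases h : ((d.setdefault cur PySem.Dict.empty).getD cur PySem.Dict.empty).contains nxt = true
  · rw [PySem.Dict.setdefault_of_contains _ _ h]
  · have h' : ((d.setdefault cur PySem.Dict.empty).getD cur PySem.Dict.empty).contains nxt = false := by simpa using h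
    rw [PySem.Dict.setdefault_of_not_contains _ _ h']
    rw [PySem.Dict.getD_insert_self, PySem.Dict.insert_insert_self,
        PySem.Dict.getD_of_not_contains _ _ h']

-- B's second-pass body is one pvAddAt with increment c
theorem pv_stepB (d : PySem.Dict String (PySem.Dict String Int)) (cur nxt : String) (c : Int) :
    d.modify cur PySem.Dict.empty (fun b => b.modify nxt 0 (· + c)) = pvAddAt d cur nxt c := by
  rw [pv_modify_eq_insert, pv_modify_eq_insert]
  by_cases h : d.contains cur = true
  · rw [pv_addAt_of_contains _ _ _ _ h]
  · have h' : d.contains cur = false := by simpa using h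
    rw [pvAddAt]
    rw [PySem.Dict.setdefault_of_not_contains _ _ h']
    rw [PySem.Dict.getD_insert_self, PySem.Dict.insert_insert_self,
        PySem.Dict.getD_of_not_contains _ _ h']

theorem pv_ports_eq (in_string : String) (k : Int) (in_dict : List (String × List (String × Int))) :
    fill_next_kmer_dict in_string k in_dict = fill_next_kmer_dict_alt in_string k in_dict := by
  unfold fill_next_kmer_dict fill_next_kmer_dict_alt
  simp only [two_mul, sub_sub, ← add_assoc]
  congr 1
  have hA : (fun (d : PySem.Dict String (PySem.Dict String Int)) (i : Int) =>
      let current_kmer := PySem.Str.slice in_string (some i) (some (i + k))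
      let next_kmer := PySem.Str.slice in_string (some (i + k)) (some (i + k + k))
      let d := d.setdefault current_kmer PySem.Dict.empty
      let inner := (d.getD current_kmer PySem.Dict.empty).setdefault next_kmer 0
      let d := d.insert current_kmer inner
      let inner2 := d.getD current_kmer PySem.Dict.empty
      d.insert current_kmer (inner2.insert next_kmer (inner2.getD next_kmer 0 + 1)))
      = fun d i => pvAddAt d (PySem.Str.slice in_string (some i) (some (i + k)))
                            (PySem.Str.slice in_string (some (i + k)) (some (i + k + k))) 1 := by
    funext d i
    exact pv_stepA d _ _
  rw [hA]
  have hB : (fun (d : PySem.Dict String (PySem.Dict String Int)) (pc : (String × String) × Int) =>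
      d.modify pc.1.1 PySem.Dict.empty (fun b => b.modify pc.1.2 0 (· + pc.2)))
      = fun d pc => pvAddAt d pc.1.1 pc.1.2 pc.2 := by
    funext d pc
    exact pv_stepB d _ _ _
  rw [hB]
  set L := PySem.List.pyRange 0 (PySem.Str.len in_string - (k + k) + 1) 1 with hL
  set g : Int → String × String := fun i =>
    (PySem.Str.slice in_string (some i) (some (i + k)),
     PySem.Str.slice in_string (some (i + k)) (some (i + k + k))) with hg
  have hA2 : L.foldl (fun d i => pvAddAt d (PySem.Str.slice in_string (some i) (some (i + k)))
                            (PySem.Str.slice in_string (some (i + k)) (some (i + k + k))) 1) (pvToND in_dict)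
      = (L.map g).foldl (fun d p => pvAddAt d p.1 p.2 1) (pvToND in_dict) := by
    rw [List.foldl_map]
  rw [hA2]
  have := pv_main (L.map g) PySem.Dict.empty (pvToND in_dict) (by simp)
  have hinit : pvApply (pvToND in_dict) (PySem.Dict.empty : PySem.Dict (String × String) Int).items = pvToND in_dict := rfl
  rw [hinit] at this
  rw [← this]
  rfl

-- ===== VERDICT (by name: the statement is the Claim_ definition above) =====
theorem fill_next_kmer_dict_spec : Claim_equal_fill_next_kmer_dict := by
  intro in_string k in_dict _
  show fill_next_kmer_dict in_string k in_dict = fill_next_kmer_dict_alt in_string k in_dict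
  exact pv_ports_eq in_string k in_dict
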